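-- pv_equiv track=rewrite | github.com/hanna-joo/CodingTest | python/01_python_basic/goorm/simulation_03.py | no_couple_score_3
-- ===== SOURCE A (Python) =====
-- def no_couple_score_3(scores):
--     occur = [0 for _ in range(200001)]
--     for i in range(len(scores)):
--         occur[abs(scores[i])] += 1
--
--     answer = 0
--     for i in range(1, 200001):
--         if occur[i] != 1:
--             continue
--         for j in range(len(scores)):
--             if abs(scores[j]) == i:
--                 answer += scores[j]
--     return answer
-- ===== SOURCE B (Python) =====
-- def no_couple_score_3(scores):
--     cnt = {}
--     for s in scores:
--         a = abs(s)
--         cnt[a] = cnt.get(a, 0) + 1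
--     total = 0
--     for s in scores:
--         if cnt[abs(s)] == 1:
--             total += s
--     return total
-- ===== Notes on version B (the rewrite author's own statement) =====
-- stated objective: faster
-- what changed: Replaces the 200001-slot table plus a rescan of the whole list for every candidate absolute value by a single hash-counter pass and one summing pass over the scores.
import Mathlib
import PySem

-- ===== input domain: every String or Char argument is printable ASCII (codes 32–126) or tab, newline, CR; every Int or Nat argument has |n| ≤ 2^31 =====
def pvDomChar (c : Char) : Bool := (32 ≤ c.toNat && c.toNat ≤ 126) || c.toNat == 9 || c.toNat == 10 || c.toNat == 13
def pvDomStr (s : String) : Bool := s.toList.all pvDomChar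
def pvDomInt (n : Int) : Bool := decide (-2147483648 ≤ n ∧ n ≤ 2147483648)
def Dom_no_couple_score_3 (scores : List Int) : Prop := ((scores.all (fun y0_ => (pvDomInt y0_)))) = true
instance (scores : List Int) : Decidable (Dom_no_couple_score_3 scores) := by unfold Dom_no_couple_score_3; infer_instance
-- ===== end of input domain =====

-- B replaces A's fixed 200001-slot table and its per-candidate rescan of the list by one counting pass and one summing pass (faster).

-- ===== PORT A =====
def no_couple_score_3 (scores : List Int) : Int :=
  -- occur = [0 for _ in range(200001)]  (Python's index-addressed int list, held as Array for O(1) indexing)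
  let occur : Array Int := ((List.range 200001).map (fun _ => (0 : Int))).toArray
  -- for i in range(len(scores)): occur[abs(scores[i])] += 1
  -- (occur[abs(..)] is exact for the in-range indices Pre_ admits; out of range Python raises IndexError, excluded by Pre_)
  let occur := (PySem.List.pyRange 0 (PySem.List.len scores) 1).foldl
    (fun occ i =>
      let v := PySem.List.pyGetD scores i 0
      occ.setIfInBounds |v|.toNat (occ.getD |v|.toNat 0 + 1)) occur
  -- answer = 0; for i in range(1, 200001): …
  (PySem.List.pyRange 1 200001 1).foldl
    (fun answer i =>
      if occur.getD i.toNat 0 ≠ 1 then answer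
      else
        -- for j in range(len(scores)): if abs(scores[j]) == i: answer += scores[j]
        (PySem.List.pyRange 0 (PySem.List.len scores) 1).foldl
          (fun answer j =>
            if |PySem.List.pyGetD scores j 0| = i then answer + PySem.List.pyGetD scores j 0
            else answer) answer) 0

-- ===== PORT B =====
def no_couple_score_3_alt (scores : List Int) : Int :=
  -- cnt = {}; for s in scores: cnt[abs(s)] = cnt.get(abs(s), 0) + 1
  let cnt : PySem.Dict Int Int :=
    scores.foldl (fun d s => d.insert |s| (d.getD |s| 0 + 1)) PySem.Dict.empty
  -- total = 0; for s in scores: if cnt[abs(s)] == 1: total += s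
  scores.foldl (fun total s => if cnt.getD |s| 0 = 1 then total + s else total) 0

-- ===== PRECONDITION & SPEC =====
-- Pre_ excludes exactly the inputs on which A raises IndexError: some |s| exceeds the table size 200000.
def Pre_no_couple_score_3 (scores : List Int) : Prop := ∀ s ∈ scores, |s| ≤ 200000
instance (scores : List Int) : Decidable (Pre_no_couple_score_3 scores) := by
  unfold Pre_no_couple_score_3; infer_instance
def pvWitness_no_couple_score_3 : List Int := [1, -2, 2, 3, 0]

def Spec_no_couple_score_3 (scores : List Int) (out : Int) : Prop := out = no_couple_score_3_alt scores
instance (scores : List Int) (out : Int) : Decidable (Spec_no_couple_score_3 scores out) := by unfold Spec_no_couple_score_3; infer_instance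

-- ===== CLAIM (what is proved, stated in full; the proofs are below) =====
def Claim_equal_no_couple_score_3 : Prop := ∀ (scores : List Int), Dom_no_couple_score_3 scores → Pre_no_couple_score_3 scores → Spec_no_couple_score_3 scores (no_couple_score_3 scores)

-- ===== LEMMAS AND PROOFS =====

-- number of occurrences of the absolute value i among the scores (as an Int)
def absCnt (scores : List Int) (i : Int) : Int := ((scores.map (fun s => |s|)).count i : Int)

-- sum of the scores with absolute value i, written as a map-sum
def absSum (scores : List Int) (i : Int) : Int :=
  (scores.map (fun s => if |s| = i then s else 0)).sum

theorem absCnt_cons_eq (v : Int) (t : List Int) (i : Int) (h : i = |v|) :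
    absCnt (v :: t) i = absCnt t i + 1 := by
  simp only [absCnt, List.map_cons, List.count_cons, h]
  simp

theorem absCnt_cons_ne (v : Int) (t : List Int) (i : Int) (h : ¬ i = |v|) :
    absCnt (v :: t) i = absCnt t i := by
  have h2 : ¬ |v| = i := fun e => h (Eq.symm e)
  simp only [absCnt, List.map_cons, List.count_cons]
  simp [h2]

theorem sum_filter_eq_sum_map_ite (l : List Int) (p : Int → Bool) :
    (l.filter p).sum = (l.map (fun x => if p x then x else 0)).sum := by
  induction l with
  | nil => rfl
  | cons a t ih => by_cases h : p a <;> simp [h, ih]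

theorem sum_map_indicator (l : List Int) (a w : Int) (h : l.Nodup) :
    (l.map (fun i => if i = a then w else 0)).sum = if a ∈ l then w else 0 := by
  induction l with
  | nil => simp
  | cons b t ih =>
    simp only [List.nodup_cons] at h
    by_cases hb : b = a
    · subst hb
      have : (t.map (fun i => if i = b then w else 0)).sum = 0 := by
        rw [ih h.2]; simp [h.1]
      simp [this]
    · have hba : a ≠ b := fun e => hb e.symm
      simp [hb, hba, ih h.2]

theorem sum_swap_int (l1 l2 : List Int) (F : Int → Int → Int) :
    (l1.map (fun i => (l2.map (F i)).sum)).sum = (l2.map (fun s => (l1.map (fun i => F i s)).sum)).sum := by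
  induction l1 with
  | nil => simp
  | cons a t ih =>
    simp only [List.map_cons, List.sum_cons, ih]
    rw [← PySem.List.sum_map_add_int]

theorem arrGetD_set_self (a : Array Int) (k : Nat) (x d : Int) (hk : k < a.size) :
    (a.setIfInBounds k x).getD k d = x := by
  simp [Array.getD, Array.size_setIfInBounds, hk]

theorem arrGetD_set_ne (a : Array Int) (k j : Nat) (x d : Int) (hne : j ≠ k) :
    (a.setIfInBounds k x).getD j d = a.getD j d := by
  simp only [Array.getD, Array.size_setIfInBounds]
  by_cases h : j < a.size
  · simp only [dif_pos h]
    exact Array.getElem_setIfInBounds_ne (by simpa using h) (Ne.symm hne)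
  · simp only [dif_neg h]

theorem arrSet_oob (a : Array Int) (k : Nat) (x : Int) (hk : ¬ k < a.size) :
    a.setIfInBounds k x = a := by
  simp [Array.setIfInBounds, hk]

theorem replicate_toArray_getD (n j : Nat) (c d : Int) (h : j < n) :
    ((List.replicate n c).toArray).getD j d = c := by
  simp [Array.getD, h]

-- occur-table invariant for A's first loop
theorem occur_spec (l : List Int) : ∀ (occ : Array Int), occ.size = 200001 →
    ∀ i : Int, 0 ≤ i → i < 200001 →
    (l.foldl (fun occ v => occ.setIfInBounds |v|.toNat (occ.getD |v|.toNat 0 + 1)) occ).getD i.toNat 0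
      = occ.getD i.toNat 0 + absCnt l i := by
  induction l with
  | nil => intro occ _ i _ _; simp [absCnt]
  | cons v t ih =>
    intro occ hlen i hi0 hi1
    simp only [List.foldl_cons]
    have hv0 : (0:Int) ≤ |v| := abs_nonneg v
    rw [ih _ (by simp [Array.size_setIfInBounds, hlen]) i hi0 hi1]
    by_cases hlt : (|v|).toNat < occ.size
    · by_cases heq : i.toNat = (|v|).toNat
      · have hieq : i = |v| := by omega
        rw [absCnt_cons_eq v t i hieq, heq,
            arrGetD_set_self occ _ _ _ hlt]
        ring
      · rw [absCnt_cons_ne v t i (by omega),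
            arrGetD_set_ne occ _ _ _ _ heq]
    · rw [arrSet_oob occ _ _ hlt, absCnt_cons_ne v t i (by omega)]

-- B computed in closed form
theorem alt_eq (scores : List Int) :
    no_couple_score_3_alt scores
      = (scores.map (fun s => if absCnt scores |s| = 1 then s else 0)).sum := by
  unfold no_couple_score_3_alt
  have hcnt : ∀ v : Int,
      (scores.foldl (fun d s => d.insert |s| (d.getD |s| 0 + 1)) PySem.Dict.empty).getD v 0
        = absCnt scores v := by
    intro v
    have h1 : scores.foldl (fun (d : PySem.Dict Int Int) s => d.insert |s| (d.getD |s| 0 + 1)) PySem.Dict.empty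
        = (scores.map (fun s => |s|)).foldl (fun (d : PySem.Dict Int Int) x => d.insert x (d.getD x 0 + 1)) PySem.Dict.empty := by
      rw [List.foldl_map]
    rw [h1, PySem.Dict.getD_foldl_insert_add_one, PySem.Dict.getD_empty]
    simp [absCnt, List.count]
  simp only [hcnt]
  rw [PySem.List.foldl_ite_eq_foldl_filter (p := fun s => absCnt scores |s| = 1) (f := fun t s => t + s)]
  rw [PySem.List.foldl_add _ (fun s => s) 0]
  simp only [List.map_id']
  rw [sum_filter_eq_sum_map_ite]
  simp

-- A computed in closed form
theorem a_eq (scores : List Int) :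
    no_couple_score_3 scores
      = ((PySem.List.pyRange 1 200001 1).map
          (fun i => if absCnt scores i = 1 then absSum scores i else 0)).sum := by
  unfold no_couple_score_3
  simp only []
  rw [PySem.List.foldl_pyRange_zero_pyGetD scores 0
      (fun (occ : Array Int) (v : Int) => occ.setIfInBounds |v|.toNat (occ.getD |v|.toNat 0 + 1))]
  rw [PySem.List.foldl_congr_mem _ _
      (fun answer i => answer + (if absCnt scores i = 1 then absSum scores i else 0)) 0 ?_]
  · rw [PySem.List.foldl_add]
    rw [zero_add]
  · intro answer i hi
    rw [PySem.List.mem_pyRange_one] at hi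
    have hocc : (scores.foldl (fun occ v => occ.setIfInBounds |v|.toNat (occ.getD |v|.toNat 0 + 1))
          (((List.range 200001).map (fun _ => (0:Int))).toArray)).getD i.toNat 0 = absCnt scores i := by
      rw [occur_spec scores _
            (by rw [List.size_toArray, List.length_map, List.length_range]) i (by omega) (by omega)]
      rw [List.map_const', List.length_range]
      rw [replicate_toArray_getD 200001 i.toNat 0 0 (by omega)]
      ring
    rw [hocc]
    rw [PySem.List.foldl_pyRange_zero_pyGetD scores 0
        (fun answer v => if |v| = i then answer + v else answer)]
    rw [PySem.List.foldl_ite_eq_foldl_filter (p := fun v => |v| = i) (f := fun a v => a + v)]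
    rw [PySem.List.foldl_add _ (fun s => s) answer]
    simp only [List.map_id']
    rw [sum_filter_eq_sum_map_ite]
    by_cases hc : absCnt scores i = 1
    · simp only [hc, if_pos, ne_eq, not_true_eq_false, absSum]
      simp
    · have : absCnt scores i ≠ 1 := hc
      simp [this]

-- ===== VERDICT (by name: the statement is the Claim_ definition above) =====
theorem no_couple_score_3_spec : Claim_equal_no_couple_score_3 := by
  intro scores _ hpre
  unfold Spec_no_couple_score_3
  rw [a_eq, alt_eq]
  -- rewrite each summand of A as a sum over the scores
  have h1 : ∀ i : Int,
      (if absCnt scores i = 1 then absSum scores i else 0)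
        = (scores.map (fun s => if |s| = i ∧ absCnt scores i = 1 then s else 0)).sum := by
    intro i
    by_cases hc : absCnt scores i = 1
    · simp only [hc, if_pos, absSum, and_true]
    · simp [hc]
  calc ((PySem.List.pyRange 1 200001 1).map
          (fun i => if absCnt scores i = 1 then absSum scores i else 0)).sum
      = ((PySem.List.pyRange 1 200001 1).map
          (fun i => (scores.map (fun s => if |s| = i ∧ absCnt scores i = 1 then s else 0)).sum)).sum := by
        simp only [h1]
    _ = (scores.map (fun s => ((PySem.List.pyRange 1 200001 1).map
          (fun i => if |s| = i ∧ absCnt scores i = 1 then s else 0)).sum)).sum := by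
        rw [sum_swap_int]
    _ = (scores.map (fun s => if absCnt scores |s| = 1 then s else 0)).sum := by
        apply congrArg
        apply List.map_congr_left
        intro s hs
        have hb : |s| ≤ 200000 := hpre s hs
        have h2 : ((PySem.List.pyRange 1 200001 1).map
            (fun i => if |s| = i ∧ absCnt scores i = 1 then s else 0))
            = ((PySem.List.pyRange 1 200001 1).map
            (fun i => if i = |s| then (if absCnt scores |s| = 1 then s else 0) else 0)) := by
          apply List.map_congr_left
          intro i _
          by_cases hv : i = |s|
          · subst hv; simp
          · have : ¬ |s| = i := fun e => hv e.symm
            simp [hv, this]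
        rw [h2, sum_map_indicator _ _ _ (PySem.List.nodup_pyRange_one 1 200001)]
        by_cases h0 : s = 0
        · subst h0
          have : ¬ ((0:Int) ∈ PySem.List.pyRange 1 200001 1) := by
            rw [PySem.List.mem_pyRange_one]; omega
          simp only [abs_zero, if_neg this]
          by_cases hc : absCnt scores 0 = 1 <;> simp [hc]
        · have : |s| ∈ PySem.List.pyRange 1 200001 1 := by
            rw [PySem.List.mem_pyRange_one]
            constructor
            · have := abs_pos.mpr h0; omega
            · omega
          rw [if_pos this]
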